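-- pv_equiv track=rewrite | github.com/yeonwoo1125/cospro-python-study | yeonwoo/answer/A씨의_추가_운동_여부_알려주.py | solution
-- ===== SOURCE A (Python) =====
-- def solution(calorie):
-- 	min_cal = calorie[0]
-- 	answer = 0
-- 	for cal in calorie:
-- 		if cal > min_cal:
-- 			answer += cal - min_cal
-- 		min_cal = min(min_cal, cal)
-- 	return answer
-- ===== SOURCE B (Python) =====
-- from itertools import accumulate
--
-- def solution(calorie):
--     mins = list(accumulate(calorie, min))
--     return sum(calorie) - sum(mins)
-- ===== Notes on version B (the rewrite author's own statement) =====
-- stated objective: idiomatic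
-- what changed: Replaces A's fused scan (running min + conditional accumulation) with a build-then-reduce form: prefix minima via itertools.accumulate, then sum(calorie) - sum(prefix_mins), using max(0, c - min_before) = c - min_including_c.
import Mathlib
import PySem

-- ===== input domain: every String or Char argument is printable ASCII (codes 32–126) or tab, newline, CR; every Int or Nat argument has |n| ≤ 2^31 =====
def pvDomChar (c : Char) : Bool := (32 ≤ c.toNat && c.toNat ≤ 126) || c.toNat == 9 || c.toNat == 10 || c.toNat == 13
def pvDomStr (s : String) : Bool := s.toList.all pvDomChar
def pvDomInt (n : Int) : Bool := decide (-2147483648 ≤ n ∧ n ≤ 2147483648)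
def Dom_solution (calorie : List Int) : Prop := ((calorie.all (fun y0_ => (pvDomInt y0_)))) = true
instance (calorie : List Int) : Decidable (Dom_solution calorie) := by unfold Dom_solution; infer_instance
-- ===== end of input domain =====

-- ===== PORT A =====
-- B rewrites A's fused scan as a build-then-reduce (prefix minima, then a sum); return values only.
def solution (calorie : List Int) : Int :=
  match calorie with
  | [] => 0  -- unreachable under Pre_solution: Python A raises IndexError on []
  | c0 :: _ =>
    (calorie.foldl
      (fun (s : Int × Int) (cal : Int) =>
        (min s.1 cal, if cal > s.1 then s.2 + (cal - s.1) else s.2))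
      (c0, 0)).2

-- ===== PORT B =====
-- accumulate(calorie, min): running minima, one output per element
def pvAccumMin (cur : Int) : List Int → List Int
  | [] => [cur]
  | c :: cs => cur :: pvAccumMin (min cur c) cs

def solution_alt (calorie : List Int) : Int :=
  let mins : List Int :=
    match calorie with
    | [] => []
    | c :: cs => pvAccumMin c cs
  calorie.sum - mins.sum

-- ===== PRECONDITION & SPEC =====
-- Pre_ excludes the empty list, on which A raises IndexError (calorie[0]).
def Pre_solution (calorie : List Int) : Prop := calorie ≠ []
instance (calorie : List Int) : Decidable (Pre_solution calorie) := by unfold Pre_solution; infer_instance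
def pvWitness_solution : List Int := [3, 1, 4, 1, 5]

def Spec_solution (calorie : List Int) (out : Int) : Prop := out = solution_alt calorie
instance (calorie : List Int) (out : Int) : Decidable (Spec_solution calorie out) := by unfold Spec_solution; infer_instance

-- ===== CLAIM (what is proved, stated in full; the proofs are below) =====
def Claim_equal_solution : Prop := ∀ (calorie : List Int), Dom_solution calorie → Pre_solution calorie → Spec_solution calorie (solution calorie)
-- ===== LEMMAS AND PROOFS =====
-- running minima seeded with a previous minimum m (one output per element of l)
def pvAccumMinFrom (m : Int) : List Int → List Int
  | [] => []
  | c :: cs => min m c :: pvAccumMinFrom (min m c) cs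

theorem pvAccumMin_eq (cur : Int) (l : List Int) :
    pvAccumMin cur l = cur :: pvAccumMinFrom cur l := by
  induction l generalizing cur with
  | nil => rfl
  | cons c cs ih => simp [pvAccumMin, pvAccumMinFrom, ih]

theorem fold_sum (l : List Int) (m a : Int) :
    (l.foldl
      (fun (s : Int × Int) (cal : Int) =>
        (min s.1 cal, if cal > s.1 then s.2 + (cal - s.1) else s.2))
      (m, a)).2 = a + l.sum - (pvAccumMinFrom m l).sum := by
  induction l generalizing m a with
  | nil => simp [pvAccumMinFrom]
  | cons c cs ih =>
    simp only [List.foldl_cons, ih, pvAccumMinFrom, List.sum_cons]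
    by_cases h : c > m
    · have hm : min m c = m := by omega
      rw [hm, if_pos h]; ring
    · have hm : min m c = c := by omega
      rw [hm, if_neg h]; ring

-- ===== VERDICT (by name: the statement is the Claim_ definition above) =====
theorem solution_spec : Claim_equal_solution := by
  intro calorie _ hpre
  unfold Spec_solution solution solution_alt
  match calorie with
  | [] => exact absurd rfl hpre
  | c0 :: cs =>
    simp only [List.foldl_cons, fold_sum, pvAccumMin_eq, List.sum_cons]
    have h1 : ¬ (c0 > c0) := by omega
    simp [h1]
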